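-- pv_equiv track=rewrite | github.com/MutationBasedBugFixings/Mutation | scripts/run_one_project_both_final.py | _unique_pkg_prefixes
-- ===== SOURCE A (Python) =====
-- from typing import List, Tuple, Set, Optional
--
-- def _unique_pkg_prefixes(names: List[str]) -> Set[str]:
--     pkgs: Set[str] = set()
--     for c in names:
--         c = c.replace("/", ".").replace(".java", "")
--         if "." in c:
--             pkgs.add(".".join(c.split(".")[:-1]))
--     result: Set[str] = set()
--     for p in sorted(pkgs):
--         if not any(p.startswith(q + ".") for q in result):
--             result.add(p)
--     return {p + ".*" for p in result} if result else {"*"}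
-- ===== SOURCE B (Python) =====
-- def _unique_pkg_prefixes(names):
--     cleaned = (c.replace("/", ".").replace(".java", "") for c in names)
--     pkgs = {".".join(n.split(".")[:-1]) for n in cleaned if "." in n}
--     # A package is kept iff it is MINIMAL in pkgs: none of its own proper
--     # dot-prefixes is itself a package.  This is an order-independent test
--     # against pkgs itself -- no greedy accumulator is maintained.  It equals
--     # A's greedy sorted scan because a shortest cover of p is itself minimal,
--     # so it is kept by the greedy scan and rejects p.
--     result = [p + ".*" for p in sorted(pkgs)
--               if all(p[:i] not in pkgs for i in range(len(p)) if p[i] == ".")]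
--     return set(result) if result else {"*"}
-- ===== Notes on version B (the rewrite author's own statement) =====
-- stated objective: alternative
-- what changed: A's greedy sorted scan that tests each candidate against the growing set of already-kept prefixes is replaced by an order-independent minimality filter: p is kept iff none of p's own proper dot-prefixes is in pkgs itself, so the sequential accumulator disappears (correct because a shortest cover of p is itself minimal, hence kept by the greedy scan); it trades A's O(k) kept-set scans per candidate for O(len(p)) hashed prefix lookups, not measurably faster on the generated inputs.
import Mathlib
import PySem

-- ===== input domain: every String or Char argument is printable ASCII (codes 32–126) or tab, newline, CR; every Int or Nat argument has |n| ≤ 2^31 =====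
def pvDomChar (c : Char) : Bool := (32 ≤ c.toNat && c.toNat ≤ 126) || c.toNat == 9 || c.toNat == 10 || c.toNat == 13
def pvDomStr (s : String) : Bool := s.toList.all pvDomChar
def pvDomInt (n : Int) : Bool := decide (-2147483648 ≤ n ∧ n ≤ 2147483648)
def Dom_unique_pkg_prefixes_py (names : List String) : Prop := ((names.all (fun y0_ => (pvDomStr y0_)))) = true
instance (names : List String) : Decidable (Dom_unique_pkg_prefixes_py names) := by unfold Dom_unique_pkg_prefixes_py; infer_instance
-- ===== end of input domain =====

-- B (alternative): A's greedy sorted scan against the accumulated kept set is replaced by an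
-- order-independent minimality filter (keep p iff no proper dot-prefix of p is in pkgs itself).

-- ===== PORT A =====
def unique_pkg_prefixes_py (names : List String) : List String :=
  let pkgs : PySem.Set String := names.foldl (fun pkgs c0 =>
    let c := PySem.Str.replace (PySem.Str.replace c0 "/" ".") ".java" ""
    if PySem.Str.isIn "." c then
      PySem.Set.add pkgs
        (PySem.Str.join "." (PySem.List.slice (((PySem.Str.split? c ".").getD [])) none (some (-1))))
    else pkgs) PySem.Set.empty
  let result : PySem.Set String := (PySem.List.sorted pkgs (fun x => x) false).foldl
    (fun result p =>
      if (result.any fun q => PySem.Str.startswith p (q ++ ".")) = false then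
        PySem.Set.add result p
      else result) PySem.Set.empty
  if result = [] then ["*"]
  else PySem.Set.ofList (result.map (fun p => p ++ ".*"))

-- ===== PORT B =====
def unique_pkg_prefixes_py_alt (names : List String) : List String :=
  let cleaned := names.map (fun c => PySem.Str.replace (PySem.Str.replace c "/" ".") ".java" "")
  let pkgs : PySem.Set String := PySem.Set.ofList (cleaned.filterMap (fun n =>
    if PySem.Str.isIn "." n then
      some (PySem.Str.join "." (PySem.List.slice (((PySem.Str.split? n ".").getD [])) none (some (-1))))
    else none))
  let result := ((PySem.List.sorted pkgs (fun x => x) false).filter (fun p =>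
      (PySem.List.pyRange 0 ((PySem.Str.len p : Int)) 1).all (fun i =>
        !((PySem.Str.pyGet? p i == some '.') &&
          PySem.Set.contains pkgs (PySem.Str.slice p none (some i)))))).map (fun p => p ++ ".*")
  if result = [] then ["*"] else PySem.Set.ofList result

-- ===== PRECONDITION & SPEC =====
def Spec_unique_pkg_prefixes_py (names : List String) (out : List String) : Prop := out = unique_pkg_prefixes_py_alt names
instance (names : List String) (out : List String) : Decidable (Spec_unique_pkg_prefixes_py names out) := by unfold Spec_unique_pkg_prefixes_py; infer_instance

-- ===== CLAIM (what is proved, stated in full; the proofs are below) =====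
def Claim_equal_unique_pkg_prefixes_py : Prop := ∀ (names : List String), Dom_unique_pkg_prefixes_py names → Spec_unique_pkg_prefixes_py names (unique_pkg_prefixes_py names)

-- ===== LEMMAS AND PROOFS =====

-- A's conditional-add loop over names equals B's filterMap-then-ofList construction.
lemma pv_pkgs_fold (names : List String) (s : PySem.Set String) :
    names.foldl (fun pkgs c0 =>
      let c := PySem.Str.replace (PySem.Str.replace c0 "/" ".") ".java" ""
      if PySem.Str.isIn "." c then
        PySem.Set.add pkgs
          (PySem.Str.join "." (PySem.List.slice ((PySem.Str.split? c ".").getD []) none (some (-1))))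
      else pkgs) s
    = ((names.map (fun c => PySem.Str.replace (PySem.Str.replace c "/" ".") ".java" "")).filterMap (fun n =>
        if PySem.Str.isIn "." n then
          some (PySem.Str.join "." (PySem.List.slice ((PySem.Str.split? n ".").getD []) none (some (-1))))
        else none)).foldl PySem.Set.add s := by
  rw [List.foldl_filterMap, List.foldl_map]
  apply PySem.List.foldl_congr_mem
  intro pkgs c0 _
  by_cases h : PySem.Str.isIn "." (PySem.Str.replace (PySem.Str.replace c0 "/" ".") ".java" "") = true
  · simp only [h, if_pos]
  · simp only [Bool.not_eq_true] at h
    simp only [h, Bool.false_eq_true, if_false]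

-- A's rejection test against a set S equals B's dot-prefix lookup test:
-- some q ∈ S with q ++ "." a prefix of p  ↔  some dot position i of p with p[:i] ∈ S.
lemma pv_cond_eq (kept : PySem.Set String) (p : String) :
    (kept.any fun q => PySem.Str.startswith p (q ++ "."))
      = ((PySem.List.pyRange 0 ((PySem.Str.len p : Int)) 1).any fun i =>
            (PySem.Str.pyGet? p i == some '.') &&
            PySem.Set.contains kept (PySem.Str.slice p none (some i))) := by
  have hdot : (".").toList = ['.'] := rfl
  rw [Bool.eq_iff_iff]
  simp only [List.any_eq_true, Bool.and_eq_true, beq_iff_eq,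
    PySem.List.mem_pyRange_one, PySem.Str.startswith_eq, PySem.Chars.startswith_iff,
    PySem.Str.len_eq]
  constructor
  · rintro ⟨q, hq, hpre⟩
    rw [String.toList_append, hdot] at hpre
    obtain ⟨t, ht⟩ := hpre
    have hlen : q.toList.length + 1 + t.length = p.toList.length := by
      have := congrArg List.length ht
      simp only [List.length_append, List.length_cons, List.length_nil] at this
      omega
    refine ⟨(q.toList.length : Int), ⟨by positivity,
      by exact_mod_cast (by omega : q.toList.length < p.toList.length)⟩, ?_, ?_⟩
    · rw [PySem.Str.pyGet?_natCast, ← ht]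
      rw [List.append_assoc, List.getElem?_append_right (by omega)]
      simp
    · have hsl : (PySem.Str.slice p none (some (q.toList.length : Int))) = q := by
        apply String.toList_inj.mp
        rw [PySem.Str.toList_slice, PySem.Chars.slice_eq_listSlice,
          PySem.List.slice_to_natCast, ← ht]
        rw [List.append_assoc, List.take_left]
      rw [hsl]
      simpa [PySem.Set.contains] using hq
  · rintro ⟨i, ⟨hi0, hilt⟩, hget, hmem⟩
    obtain ⟨n, rfl⟩ := Int.eq_ofNat_of_zero_le hi0
    rw [PySem.Str.pyGet?_natCast] at hget
    refine ⟨PySem.Str.slice p none (some (n : Int)),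
      by simpa [PySem.Set.contains] using hmem, ?_⟩
    rw [String.toList_append, hdot, PySem.Str.toList_slice, PySem.Chars.slice_eq_listSlice,
      PySem.List.slice_to_natCast]
    have h1 : List.take (n+1) p.toList = List.take n p.toList ++ ['.'] := by
      rw [List.take_add_one, hget]
      rfl
    rw [← h1]
    exact List.take_prefix _ _

-- A character list is lexicographically smaller than any of its strict extensions.
lemma pv_lt_append (l : List Char) (c : Char) (t : List Char) : l < l ++ c :: t := by
  induction l with
  | nil => simp
  | cons a l ih => exact List.Lex.cons ih

-- A proper package-ancestor is lexicographically smaller.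
lemma pv_cover_lt (p q : String) (h : PySem.Str.startswith p (q ++ ".") = true) : q < p := by
  rw [PySem.Str.startswith_eq, PySem.Chars.startswith_iff] at h
  obtain ⟨t, ht⟩ := h
  rw [String.lt_iff_toList_lt, ← ht, String.toList_append]
  rw [show (".").toList = ['.'] from rfl, List.append_assoc]
  exact pv_lt_append _ _ _

-- A proper package-ancestor is strictly shorter.
lemma pv_cover_len (p q : String) (h : PySem.Str.startswith p (q ++ ".") = true) :
    q.toList.length < p.toList.length := by
  rw [PySem.Str.startswith_eq, PySem.Chars.startswith_iff] at h
  obtain ⟨t, ht⟩ := h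
  have := congrArg List.length ht
  rw [String.toList_append, show (".").toList = ['.'] from rfl] at this
  simp only [List.length_append, List.length_cons, List.length_nil] at this
  omega

-- The ancestor relation is transitive through the middle string.
lemma pv_cover_trans (p q r : String) (h1 : PySem.Str.startswith q (r ++ ".") = true)
    (h2 : PySem.Str.startswith p (q ++ ".") = true) :
    PySem.Str.startswith p (r ++ ".") = true := by
  rw [PySem.Str.startswith_eq, PySem.Chars.startswith_iff] at *
  refine h1.trans (List.IsPrefix.trans ?_ h2)
  rw [String.toList_append]
  exact List.prefix_append _ _

-- Any covered p has a MINIMAL cover in S: a cover that itself has no cover in S.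
lemma pv_min_cover (S : List String) (n : Nat) :
    ∀ (q p : String), q.toList.length ≤ n → q ∈ S →
      PySem.Str.startswith p (q ++ ".") = true →
      ∃ q0 ∈ S, PySem.Str.startswith p (q0 ++ ".") = true ∧
        (S.any fun r => PySem.Str.startswith q0 (r ++ ".")) = false := by
  induction n with
  | zero =>
    intro q p hn hq hcov
    refine ⟨q, hq, hcov, ?_⟩
    rw [List.any_eq_false]
    intro r _ hr
    have := pv_cover_len q r hr
    omega
  | succ n ih =>
    intro q p hn hq hcov
    by_cases hmin : (S.any fun r => PySem.Str.startswith q (r ++ ".")) = false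
    · exact ⟨q, hq, hcov, hmin⟩
    · rw [Bool.not_eq_false, List.any_eq_true] at hmin
      obtain ⟨r, hr, hrc⟩ := hmin
      have hlen := pv_cover_len q r hrc
      exact ih r p (by omega) hr (pv_cover_trans p q r hrc hcov)

-- The greedy sorted scan keeps exactly the elements of the sorted list that are
-- minimal with respect to S (no ancestor anywhere in S).
lemma pv_greedy_filter (S : List String) :
    ∀ (L proc : List String),
      L.Pairwise (· < ·) →
      (∀ a ∈ proc, ∀ b ∈ L, a < b) →
      (∀ q ∈ proc, q ∈ S) →
      (∀ q ∈ L, q ∈ S) →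
      (∀ q ∈ S, q ∈ proc ∨ q ∈ L) →
      L.foldl (fun result p =>
          if (result.any fun q => PySem.Str.startswith p (q ++ ".")) = false then
            PySem.Set.add result p
          else result)
        (proc.filter (fun p => !(S.any fun q => PySem.Str.startswith p (q ++ "."))))
      = (proc ++ L).filter (fun p => !(S.any fun q => PySem.Str.startswith p (q ++ "."))) := by
  intro L
  induction L with
  | nil => intro proc _ _ _ _ _; simp
  | cons p t ih =>
    intro proc hpw hlt hprocS hLS hcov
    have hpnotproc : p ∉ proc := fun hmem => lt_irrefl p (hlt p hmem p (by simp))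
    have hcondeq :
        ((proc.filter (fun p' => !(S.any fun q => PySem.Str.startswith p' (q ++ ".")))).any
          (fun q => PySem.Str.startswith p (q ++ ".")))
        = (S.any fun q => PySem.Str.startswith p (q ++ ".")) := by
      rw [Bool.eq_iff_iff]
      simp only [List.any_eq_true, List.mem_filter, Bool.not_eq_eq_eq_not, Bool.not_true]
      constructor
      · rintro ⟨q, ⟨hqproc, _⟩, hqc⟩
        exact ⟨q, hprocS q hqproc, hqc⟩
      · rintro ⟨r, hrS, hrc⟩
        obtain ⟨q0, hq0S, hq0c, hq0min⟩ :=
          pv_min_cover S r.toList.length r p (le_refl _) hrS hrc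
        have hq0lt : q0 < p := pv_cover_lt p q0 hq0c
        have hq0proc : q0 ∈ proc := by
          rcases hcov q0 hq0S with h | h
          · exact h
          · rcases List.mem_cons.mp h with h | h
            · exact absurd (h ▸ hq0lt) (lt_irrefl p)
            · exact absurd ((List.pairwise_cons.mp hpw).1 q0 h) (not_lt_of_gt hq0lt)
        exact ⟨q0, ⟨hq0proc, hq0min⟩, hq0c⟩
    simp only [List.foldl_cons]
    rw [hcondeq]
    by_cases hS : (S.any fun q => PySem.Str.startswith p (q ++ ".")) = false
    · rw [if_pos hS]
      have hadd : PySem.Set.add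
          (proc.filter (fun p' => !(S.any fun q => PySem.Str.startswith p' (q ++ ".")))) p
          = proc.filter (fun p' => !(S.any fun q => PySem.Str.startswith p' (q ++ "."))) ++ [p] := by
        generalize hR : proc.filter (fun p' => !(S.any fun q => PySem.Str.startswith p' (q ++ "."))) = R
        have hp : p ∉ R := by
          rw [← hR]; exact fun hmem => hpnotproc (List.mem_filter.mp hmem).1
        simp [PySem.Set.add, PySem.Set.contains, hp]
      have hfil : proc.filter (fun p' => !(S.any fun q => PySem.Str.startswith p' (q ++ "."))) ++ [p]
          = (proc ++ [p]).filter (fun p' => !(S.any fun q => PySem.Str.startswith p' (q ++ "."))) := by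
        rw [List.filter_append]
        congr 1
        simp only [List.filter_cons, List.filter_nil, hS, Bool.not_false, if_true]
      rw [hadd, hfil, ih (proc ++ [p]) hpw.of_cons ?hlt ?hprocS ?hLS ?hcov, List.append_assoc]
      · rfl
      case hlt =>
        intro a ha b hb
        rcases List.mem_append.mp ha with h | h
        · exact hlt a h b (List.mem_cons_of_mem _ hb)
        · simp only [List.mem_singleton] at h
          exact h ▸ (List.pairwise_cons.mp hpw).1 b hb
      case hprocS =>
        intro q hq
        rcases List.mem_append.mp hq with h | h
        · exact hprocS q h
        · simp only [List.mem_singleton] at h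
          exact h ▸ hLS p (by simp)
      case hLS => exact fun q hq => hLS q (List.mem_cons_of_mem _ hq)
      case hcov =>
        intro q hq
        rcases hcov q hq with h | h
        · exact Or.inl (List.mem_append.mpr (Or.inl h))
        · rcases List.mem_cons.mp h with h | h
          · exact Or.inl (List.mem_append.mpr (Or.inr (by simp [h])))
          · exact Or.inr h
    · rw [if_neg hS]
      rw [Bool.not_eq_false] at hS
      have hfilter :
          (proc ++ [p]).filter (fun p' => !(S.any fun q => PySem.Str.startswith p' (q ++ ".")))
          = proc.filter (fun p' => !(S.any fun q => PySem.Str.startswith p' (q ++ "."))) := by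
        rw [List.filter_append]
        simp only [List.filter_cons, List.filter_nil, hS, Bool.not_true, Bool.false_eq_true,
          if_false, List.append_nil]
      rw [← hfilter, ih (proc ++ [p]) hpw.of_cons ?hlt ?hprocS ?hLS ?hcov, List.append_assoc]
      · rfl
      case hlt =>
        intro a ha b hb
        rcases List.mem_append.mp ha with h | h
        · exact hlt a h b (List.mem_cons_of_mem _ hb)
        · simp only [List.mem_singleton] at h
          exact h ▸ (List.pairwise_cons.mp hpw).1 b hb
      case hprocS =>
        intro q hq
        rcases List.mem_append.mp hq with h | h
        · exact hprocS q h
        · simp only [List.mem_singleton] at h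
          exact h ▸ hLS p (by simp)
      case hLS => exact fun q hq => hLS q (List.mem_cons_of_mem _ hq)
      case hcov =>
        intro q hq
        rcases hcov q hq with h | h
        · exact Or.inl (List.mem_append.mpr (Or.inl h))
        · rcases List.mem_cons.mp h with h | h
          · exact Or.inl (List.mem_append.mpr (Or.inr (by simp [h])))
          · exact Or.inr h

-- Boolean de Morgan over a list: all-not equals not-any.
lemma pv_all_not {a : Type} (l : List a) (f : a -> Bool) :
    (l.all fun x => !f x) = !(l.any f) := by
  induction l with
  | nil => rfl
  | cons x xs ih => simp [List.all_cons, List.any_cons, ih, Bool.not_or]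

-- B's per-element boolean test is the negation of A's rejection test against S.
lemma pv_pred_eq (S : PySem.Set String) (p : String) :
    ((PySem.List.pyRange 0 ((PySem.Str.len p : Int)) 1).all (fun i =>
        !((PySem.Str.pyGet? p i == some '.') &&
          PySem.Set.contains S (PySem.Str.slice p none (some i)))))
    = !(S.any fun q => PySem.Str.startswith p (q ++ ".")) := by
  rw [pv_all_not]
  exact congrArg Bool.not (pv_cond_eq S p).symm

-- Both ports postprocess the same kept list the same way.
lemma pv_fin (rA : List String) :
    (if rA = [] then ["*"] else PySem.Set.ofList (rA.map (fun p => p ++ ".*")))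
      = (if rA.map (fun p => p ++ ".*") = [] then ["*"]
         else PySem.Set.ofList (rA.map (fun p => p ++ ".*")) : List String) := by
  by_cases h : rA = []
  · rw [if_pos h, if_pos (by rw [h]; rfl)]
  · rw [if_neg h, if_neg (by simpa [List.map_eq_nil_iff] using h)]

lemma pv_main (names : List String) :
    unique_pkg_prefixes_py names = unique_pkg_prefixes_py_alt names := by
  simp only [unique_pkg_prefixes_py, unique_pkg_prefixes_py_alt, PySem.Set.empty]
  rw [pv_pkgs_fold names [], ← PySem.Set.ofList_eq_foldl]
  have hgf := pv_greedy_filter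
    (PySem.Set.ofList ((names.map (fun c => PySem.Str.replace (PySem.Str.replace c "/" ".") ".java" "")).filterMap (fun n =>
      if PySem.Str.isIn "." n then
        some (PySem.Str.join "." (PySem.List.slice ((PySem.Str.split? n ".").getD []) none (some (-1))))
      else none)))
    (PySem.List.sorted (PySem.Set.ofList ((names.map (fun c => PySem.Str.replace (PySem.Str.replace c "/" ".") ".java" "")).filterMap (fun n =>
      if PySem.Str.isIn "." n then
        some (PySem.Str.join "." (PySem.List.slice ((PySem.Str.split? n ".").getD []) none (some (-1))))
      else none))) (fun x => x) false)
    []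
    (PySem.List.sorted_ofList_pairwise_lt _)
    (by intro a ha; simp at ha)
    (by intro q hq; simp at hq)
    (by intro q hq; exact (PySem.List.mem_sorted _ _ _ _).mp hq)
    (by intro q hq; exact Or.inr ((PySem.List.mem_sorted _ _ _ _).mpr hq))
  simp only [List.filter_nil, List.nil_append] at hgf
  rw [hgf, List.filter_congr (fun a _ => pv_pred_eq _ a)]
  exact pv_fin _

-- ===== VERDICT (by name: the statement is the Claim_ definition above) =====
theorem unique_pkg_prefixes_py_spec : Claim_equal_unique_pkg_prefixes_py := by
  intro names _
  unfold Spec_unique_pkg_prefixes_py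
  exact pv_main names
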